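-- pv_equiv track=rewrite | github.com/kazuya-111/kazuya-111 | list-and-social-network/nakky007mymail.unisa.edu.au_list_function.py | insert_value
-- ===== SOURCE A (Python) =====
-- def length(my_list):
--     #number of count= measure
--     measure = 0
--
--     # count the list of elements by using for loop.
--     for item in my_list:
--         measure = measure + 1
--
--     #if not return disiplay none
--     return measure
--
-- def insert_value(my_list, value, insert_position):
--     #empty list
--     new_list = []
--
--     #specified position is outside the range of the list.
--     if insert_position > length(my_list):
--         #be adjusted to the end.
--         insert_position = length(my_list)
--     elif insert_position < 0:
--         #be adjusted to beginning.
--         insert_position = 0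
--
--     #for loop
--     for index in range(length(my_list)):
--         #value add to new list
--         if index == insert_position:
--             new_list.append(value)
--         new_list.append(my_list[index])
--     #add value end of list
--     if insert_position == length(my_list):
--         new_list.append(value)
--
--     return new_list
-- ===== SOURCE B (Python) =====
-- def insert_value(my_list, value, insert_position):
--     n = len(my_list)
--     if insert_position > n:
--         pos = n
--     elif insert_position < 0:
--         pos = 0
--     else:
--         pos = insert_position
--     return list(my_list[:pos]) + [value] + list(my_list[pos:])
-- ===== Notes on version B (the rewrite author's own statement) =====
-- stated objective: simpler
-- what changed: Replaces A's hand-rolled length loop plus index loop (with an equality test at every index to decide where to splice the value in) by a single clamp of the position followed by slice concatenation my_list[:pos] + [value] + my_list[pos:].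
import Mathlib
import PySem

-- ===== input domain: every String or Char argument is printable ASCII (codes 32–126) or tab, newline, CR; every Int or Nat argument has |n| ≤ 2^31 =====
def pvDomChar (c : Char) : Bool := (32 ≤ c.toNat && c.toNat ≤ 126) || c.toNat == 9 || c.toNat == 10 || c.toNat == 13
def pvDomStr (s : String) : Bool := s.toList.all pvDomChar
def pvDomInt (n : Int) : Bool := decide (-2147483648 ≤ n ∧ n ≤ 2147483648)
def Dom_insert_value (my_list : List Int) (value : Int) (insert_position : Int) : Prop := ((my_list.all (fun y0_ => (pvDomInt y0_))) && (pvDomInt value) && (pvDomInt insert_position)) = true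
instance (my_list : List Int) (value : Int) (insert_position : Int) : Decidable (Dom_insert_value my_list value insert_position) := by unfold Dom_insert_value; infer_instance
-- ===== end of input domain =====

-- B replaces A's hand-rolled length loop and index loop (equality test at every
-- index to splice the value in) by a clamp followed by slice concatenation; objective: simpler.

-- ===== PORT A =====
-- port of the helper `length`: counts elements with a loop
def pyLength (my_list : List Int) : Int :=
  my_list.foldl (fun measure _ => measure + 1) 0

def insert_value (my_list : List Int) (value : Int) (insert_position : Int) : List Int :=
  let ip : Int :=
    if insert_position > pyLength my_list then pyLength my_list
    else if insert_position < 0 then 0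
    else insert_position
  let new_list :=
    (PySem.List.pyRange 0 (pyLength my_list) 1).foldl
      (fun acc index =>
        (if index = ip then acc ++ [value] else acc) ++ [PySem.List.pyGetD my_list index 0]) []
  if ip = pyLength my_list then new_list ++ [value] else new_list

-- ===== PORT B =====
def insert_value_alt (my_list : List Int) (value : Int) (insert_position : Int) : List Int :=
  let n : Int := PySem.List.len my_list
  let pos : Int :=
    if insert_position > n then n
    else if insert_position < 0 then 0
    else insert_position
  PySem.List.slice my_list none (some pos) ++ [value] ++ PySem.List.slice my_list (some pos) none

-- ===== PRECONDITION & SPEC =====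
def Spec_insert_value (my_list : List Int) (value : Int) (insert_position : Int) (out : List Int) : Prop := out = insert_value_alt my_list value insert_position
instance (my_list : List Int) (value : Int) (insert_position : Int) (out : List Int) : Decidable (Spec_insert_value my_list value insert_position out) := by unfold Spec_insert_value; infer_instance

-- ===== CLAIM (what is proved, stated in full; the proofs are below) =====
def Claim_equal_insert_value : Prop := ∀ (my_list : List Int) (value : Int) (insert_position : Int), Dom_insert_value my_list value insert_position → Spec_insert_value my_list value insert_position (insert_value my_list value insert_position)

-- ===== LEMMAS AND PROOFS =====

theorem pyLength_eq (l : List Int) : pyLength l = (l.length : Int) := by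
  unfold pyLength
  induction l using List.reverseRecOn with
  | nil => simp
  | append_singleton xs x ih => simp [List.foldl_append, ih]

-- the value of A's main loop after the first k iterations
theorem loopA_eq (l : List Int) (v : Int) (p k : Nat) (hk : k ≤ l.length) :
    (PySem.List.pyRange 0 (k : Int) 1).foldl
      (fun acc index =>
        (if index = (p : Int) then acc ++ [v] else acc) ++ [PySem.List.pyGetD l index 0]) []
    = if p < k then l.take p ++ v :: (l.take k).drop p else l.take k := by
  induction k with
  | zero => simp [PySem.List.pyRange]
  | succ k ih =>
    have hk' : k ≤ l.length := Nat.le_of_succ_le hk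
    have hkl : k < l.length := hk
    have hcast : ((k + 1 : Nat) : Int) = (k : Int) + 1 := by push_cast; ring
    rw [hcast, PySem.List.pyRange_one_succ_right (by omega), List.foldl_append, ih hk']
    have hget : PySem.List.pyGetD l (k : Int) 0 = l[k] := by
      simpa using PySem.List.pyGetD_ofNat (xs := l) (n := k) (d := 0) hkl
    have htake : l.take (k + 1) = l.take k ++ [l[k]] := by
      rw [List.take_add_one, List.getElem?_eq_getElem hkl]
      rfl
    simp only [List.foldl_cons, List.foldl_nil]
    by_cases hpk : p < k
    · have hne : ¬ ((k : Int) = (p : Int)) := by exact_mod_cast Nat.ne_of_gt hpk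
      rw [if_pos hpk, if_neg hne, if_pos (Nat.lt_succ_of_lt hpk), htake,
        List.drop_append_of_le_length (by simp; try omega), hget]
      simp
    · by_cases hpe : p = k
      · subst hpe
        rw [if_neg hpk, if_pos rfl, if_pos (Nat.lt_succ_self p), htake,
          List.drop_append_of_le_length (by simp; try omega), hget]
        simp [List.drop_of_length_le (by simp; try omega : (l.take p).length ≤ p)]
      · have hlt : ¬ (p < k + 1) := by omega
        have hne : ¬ ((k : Int) = (p : Int)) := by
          intro h; exact hpe (by exact_mod_cast h.symm)
        rw [if_neg hpk, if_neg hne, if_neg hlt, hget, htake]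

-- ===== VERDICT (by name: the statement is the Claim_ definition above) =====
theorem insert_value_spec : Claim_equal_insert_value := by
  intro my_list value insert_position _
  unfold Spec_insert_value insert_value insert_value_alt
  simp only [pyLength_eq, PySem.List.len_eq]
  set ip : Int := if insert_position > (my_list.length : Int) then (my_list.length : Int)
    else if insert_position < 0 then 0 else insert_position with hip
  have hip0 : 0 ≤ ip := by rw [hip]; split_ifs <;> omega
  have hipn : ip ≤ (my_list.length : Int) := by rw [hip]; split_ifs <;> omega
  clear_value ip
  obtain ⟨p, hp⟩ : ∃ p : Nat, ip = (p : Int) := ⟨ip.toNat, (Int.toNat_of_nonneg hip0).symm⟩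
  subst hp
  have hpn : p ≤ my_list.length := by omega
  rw [PySem.List.slice_to_natCast, PySem.List.slice_from_natCast,
    loopA_eq my_list value p my_list.length (le_refl _)]
  by_cases hpe : p = my_list.length
  · rw [if_pos (by exact_mod_cast hpe), if_neg (by omega), hpe]
    simp
  · have hlt : p < my_list.length := Nat.lt_of_le_of_ne hpn hpe
    rw [if_neg (by exact_mod_cast hpe), if_pos hlt]
    simp
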